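-- pv_equiv track=rewrite | github.com/pratyaynotfound/gine-edge-classification | utils.py | ip2higlist
-- ===== SOURCE A (Python) =====
-- def ip2higlist(p):
--     """Hierarchical IP tokenization."""
--     l = []
--     spl = p.strip().split('.')
--     for i in spl:
--         if len(l) != 0:
--             l.append(l[-1] + '.' + i)
--         else:
--             l.append(i)
--     return l
-- ===== SOURCE B (Python) =====
-- def ip2higlist(p):
--     """Hierarchical IP tokenization."""
--     spl = p.strip().split('.')
--     return ['.'.join(spl[:i + 1]) for i in range(len(spl))]
-- ===== Notes on version B (the rewrite author's own statement) =====
-- stated objective: idiomatic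
-- what changed: Replaces the stateful loop (maintain last prefix, branch on empty accumulator) with a single list comprehension that recomputes each cumulative prefix independently as '.'.join(spl[:i+1]), eliminating the emptiness guard and the running accumulator.
import Mathlib
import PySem

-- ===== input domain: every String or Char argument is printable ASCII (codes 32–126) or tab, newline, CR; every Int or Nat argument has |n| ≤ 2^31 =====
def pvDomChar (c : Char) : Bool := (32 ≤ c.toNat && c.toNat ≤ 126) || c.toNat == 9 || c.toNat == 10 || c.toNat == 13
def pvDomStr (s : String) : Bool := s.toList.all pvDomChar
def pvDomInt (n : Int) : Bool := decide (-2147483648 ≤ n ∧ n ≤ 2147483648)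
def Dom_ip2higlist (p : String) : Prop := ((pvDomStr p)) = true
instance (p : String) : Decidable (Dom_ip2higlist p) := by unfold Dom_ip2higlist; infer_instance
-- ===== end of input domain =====

-- B replaces A's stateful accumulator loop (branch on empty, extend the last prefix) by a
-- list comprehension recomputing each cumulative prefix independently ('.'.join(spl[:i+1])).

-- ===== PORT A =====
-- the loop body: if len(l) != 0: l.append(l[-1] + '.' + i) else: l.append(i)
-- l[-1] is ported as PySem.List.pyGetD l (-1) "" — exact here since the branch guarantees l ≠ [].
-- Python '+' on strings is Lean's ++ on String (exact on code points).
def ip2higlistStep (l : List String) (i : String) : List String :=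
  if l.length ≠ 0 then l ++ [PySem.List.pyGetD l (-1) "" ++ "." ++ i] else l ++ [i]

-- p.strip().split('.'); sep "." ≠ "" so split? is always some
def ip2higlistSpl (p : String) : List String :=
  (PySem.Str.split? (PySem.Str.strip p) ".").getD []

def ip2higlist (p : String) : List String :=
  (ip2higlistSpl p).foldl ip2higlistStep []

-- ===== PORT B =====
def ip2higlist_alt (p : String) : List String :=
  (PySem.List.pyRange 0 (ip2higlistSpl p).length 1).map
    (fun i => PySem.Str.join "." (PySem.List.slice (ip2higlistSpl p) none (some (i + 1))))

-- ===== PRECONDITION & SPEC =====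
def Spec_ip2higlist (p : String) (out : List String) : Prop := out = ip2higlist_alt p
instance (p : String) (out : List String) : Decidable (Spec_ip2higlist p out) := by unfold Spec_ip2higlist; infer_instance

-- ===== CLAIM (what is proved, stated in full; the proofs are below) =====
def Claim_equal_ip2higlist : Prop := ∀ (p : String), Dom_ip2higlist p → Spec_ip2higlist p (ip2higlist p)

-- ===== LEMMAS AND PROOFS =====

lemma chars_join_snoc (sep x : List Char) :
    ∀ (xs : List (List Char)), xs ≠ [] →
      PySem.Chars.join sep (xs ++ [x]) = PySem.Chars.join sep xs ++ sep ++ x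
  | [], h => absurd rfl h
  | [a], _ => by
      simp [PySem.Chars.join_cons_cons, PySem.Chars.join_singleton]
  | a :: b :: tl, _ => by
      have ih := chars_join_snoc sep x (b :: tl) (by simp)
      simp only [List.cons_append] at ih ⊢
      rw [PySem.Chars.join_cons_cons, PySem.Chars.join_cons_cons, ih]
      simp [List.append_assoc]

lemma str_join_snoc (ss : List String) (s : String) (h : ss ≠ []) :
    PySem.Str.join "." (ss ++ [s]) = PySem.Str.join "." ss ++ "." ++ s := by
  apply String.toList_inj.mp
  simp only [PySem.Str.toList_join, List.map_append, List.map_cons, List.map_nil,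
    String.toList_append]
  exact chars_join_snoc _ _ _ (by simpa using h)

lemma str_join_single (s : String) : PySem.Str.join "." [s] = s := by
  apply String.toList_inj.mp
  simp [PySem.Str.toList_join, PySem.Chars.join_singleton]

lemma ip2higlist_core (spl : List String) :
    spl.foldl ip2higlistStep []
      = (List.range spl.length).map (fun k => PySem.Str.join "." (spl.take (k + 1))) := by
  induction spl using List.reverseRecOn with
  | nil => simp
  | append_singleton xs x ih =>
    rw [List.foldl_append, ih]
    cases xs with
    | nil =>
      simp [ip2higlistStep, str_join_single]
    | cons a tl =>
      set n := (a :: tl).length with hn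
      have hnpos : 0 < n := by simp [hn]
      have hlhs : ip2higlistStep
          ((List.range n).map (fun k => PySem.Str.join "." ((a :: tl).take (k + 1)))) x
          = (List.range n).map (fun k => PySem.Str.join "." ((a :: tl).take (k + 1)))
            ++ [PySem.Str.join "." (a :: tl) ++ "." ++ x] := by
      -- the guard fires (the list has length n > 0) and the last element is join of the full list
        unfold ip2higlistStep
        rw [if_pos (by simp [hn])]
        obtain ⟨m, hm⟩ : ∃ m, n = m + 1 := ⟨n - 1, by omega⟩
        rw [hm, List.range_succ, List.map_append, List.map_cons, List.map_nil,
          List.append_assoc]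
        rw [PySem.List.pyGetD_neg_one_append_singleton]
        have : (a :: tl).take (m + 1) = a :: tl := by
          apply List.take_of_length_le; omega
        simp [this]
      rw [List.foldl_cons, List.foldl_nil, hlhs]
      have hlen : ((a :: tl) ++ [x]).length = n + 1 := by simp [hn]
      rw [hlen, List.range_succ, List.map_append, List.map_cons, List.map_nil]
      congr 1
      · apply List.map_congr_left
        intro k hk
        rw [List.mem_range] at hk
        rw [List.take_append_of_le_length (by omega)]
      · have hfull : ((a :: tl) ++ [x]).take (n + 1) = (a :: tl) ++ [x] := by
          apply List.take_of_length_le; simp [hn]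
        rw [hfull, str_join_snoc _ _ (by simp)]

lemma ip2higlist_alt_eq (p : String) :
    ip2higlist_alt p
      = (List.range (ip2higlistSpl p).length).map
          (fun k => PySem.Str.join "." ((ip2higlistSpl p).take (k + 1))) := by
  unfold ip2higlist_alt
  rw [PySem.List.pyRange_one, List.map_map]
  simp only [Int.sub_zero, Int.toNat_natCast]
  apply List.map_congr_left
  intro k hk
  simp only [Function.comp_apply, zero_add]
  have h1 : (k : Int) + 1 = ((k + 1 : Nat) : Int) := by push_cast; ring
  rw [h1, PySem.List.slice_to_natCast]

-- ===== VERDICT (by name: the statement is the Claim_ definition above) =====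
theorem ip2higlist_spec : Claim_equal_ip2higlist := by
  intro p _
  unfold Spec_ip2higlist ip2higlist
  rw [ip2higlist_core, ip2higlist_alt_eq]
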